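-- pv_equiv track=rewrite | github.com/Karamba91/adventofcode2021 | day11/day11.py | charge_flash
-- ===== SOURCE A (Python) =====
-- def charge_flash(map_lst, coords):
--     return_lst = []
--     for y, row in enumerate(map_lst):
--         temp =[]
--         for x, p in enumerate(row):
--             if (x, y) in coords:
--                 if p != 0:
--                     temp += [p + 1]
--                 else:
--                     temp += [0]
--             else:
--                 temp += [p]
--         return_lst += [temp]
--     return return_lst
-- ===== SOURCE B (Python) =====
-- def charge_flash(map_lst, coords):
--     result = [list(row) for row in map_lst]
--     for x, y in set(coords):
--         if 0 <= y < len(result) and 0 <= x < len(result[y]) and result[y][x] != 0: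
--             result[y][x] += 1
--     return result
-- ===== Notes on version B (the rewrite author's own statement) =====
-- stated objective: faster
-- what changed: Instead of scanning every grid cell and testing membership of (x, y) in the coords list (O(H*W*|coords|)), B copies the grid once and updates only the cells named by the deduplicated coords (O(H*W + |coords|)).
import Mathlib
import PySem

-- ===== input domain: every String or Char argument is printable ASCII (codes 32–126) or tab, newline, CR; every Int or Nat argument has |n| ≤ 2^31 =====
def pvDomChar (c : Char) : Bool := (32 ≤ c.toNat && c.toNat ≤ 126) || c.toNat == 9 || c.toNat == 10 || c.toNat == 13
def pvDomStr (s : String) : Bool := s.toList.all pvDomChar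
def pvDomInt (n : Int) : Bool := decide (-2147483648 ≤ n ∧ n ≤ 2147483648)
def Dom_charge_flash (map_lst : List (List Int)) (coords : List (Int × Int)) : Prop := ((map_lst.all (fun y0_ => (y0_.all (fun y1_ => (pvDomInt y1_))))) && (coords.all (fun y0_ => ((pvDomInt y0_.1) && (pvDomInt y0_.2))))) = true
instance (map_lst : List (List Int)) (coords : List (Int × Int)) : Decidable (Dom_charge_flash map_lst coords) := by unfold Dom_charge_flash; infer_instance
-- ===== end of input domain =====

-- B changes the algorithm: instead of scanning every cell and testing the coords list,
-- it copies the grid and updates only the (deduplicated) listed cells.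

-- ===== PORT A =====
-- literal port of A: for each enumerated row, for each enumerated cell, append
-- p+1 / 0 / p according to membership of (x, y) in coords.
def charge_flash (map_lst : List (List Int)) (coords : List (Int × Int)) : List (List Int) :=
  (PySem.List.enumerate map_lst).foldl
    (fun return_lst yr =>
      return_lst ++
        [(PySem.List.enumerate yr.2).foldl
          (fun temp xp =>
            temp ++ [if (xp.1, yr.1) ∈ coords then (if xp.2 ≠ 0 then xp.2 + 1 else 0) else xp.2])
          []])
    []

-- ===== PORT B =====
-- one in-range, nonzero cell update (Source B's loop body); row copies of Source B are identity here.
def cfUpd (g : List (List Int)) (c : Int × Int) : List (List Int) :=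
  if 0 ≤ c.2 ∧ c.2 < (g.length : Int) ∧ 0 ≤ c.1 ∧ c.1 < ((g.getD c.2.toNat []).length : Int)
      ∧ (g.getD c.2.toNat []).getD c.1.toNat 0 ≠ 0 then
    g.set c.2.toNat ((g.getD c.2.toNat []).set c.1.toNat ((g.getD c.2.toNat []).getD c.1.toNat 0 + 1))
  else g

def charge_flash_alt (map_lst : List (List Int)) (coords : List (Int × Int)) : List (List Int) :=
  (PySem.Set.ofList coords).foldl cfUpd map_lst

-- ===== PRECONDITION & SPEC =====
def Spec_charge_flash (map_lst : List (List Int)) (coords : List (Int × Int)) (out : List (List Int)) : Prop := out = charge_flash_alt map_lst coords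
instance (map_lst : List (List Int)) (coords : List (Int × Int)) (out : List (List Int)) : Decidable (Spec_charge_flash map_lst coords out) := by unfold Spec_charge_flash; infer_instance

-- ===== CLAIM (what is proved, stated in full; the proofs are below) =====
def Claim_equal_charge_flash : Prop := ∀ (map_lst : List (List Int)) (coords : List (Int × Int)), Dom_charge_flash map_lst coords → Spec_charge_flash map_lst coords (charge_flash map_lst coords)

-- ===== LEMMAS AND PROOFS =====

-- common pointwise description of the result
def cfSpec (cs : List (Int × Int)) (g : List (List Int)) : List (List Int) :=
  g.mapIdx (fun y row => row.mapIdx (fun x p => if ((x : Int), (y : Int)) ∈ cs ∧ p ≠ 0 then p + 1 else p))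

theorem foldl_snoc_map {α β : Type} (f : α → β) :
    ∀ (l : List α) (acc : List β), l.foldl (fun t a => t ++ [f a]) acc = acc ++ l.map f := by
  intro l
  induction l with
  | nil => simp
  | cons a l ih => intro acc; simp [List.foldl, ih]

theorem charge_flash_eq_cfSpec (map_lst : List (List Int)) (coords : List (Int × Int)) :
    charge_flash map_lst coords = cfSpec coords map_lst := by
  unfold charge_flash cfSpec
  rw [foldl_snoc_map]
  apply List.ext_getElem
  · simp [PySem.List.length_enumerate]
  · intro y h1 h2
    simp only [List.getElem_map, PySem.List.getElem_enumerate, List.getElem_mapIdx, List.nil_append]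
    rw [foldl_snoc_map]
    apply List.ext_getElem
    · simp [PySem.List.length_enumerate]
    · intro x h3 h4
      simp only [List.getElem_map, PySem.List.getElem_enumerate, List.getElem_mapIdx,
        List.nil_append, Int.zero_add]
      split_ifs <;> simp_all

-- rows on which c never hits a nonzero cell: dropping c from the coordinate list changes nothing
theorem rowEq_skip (cs : List (Int × Int)) (c : Int × Int) (y : Nat) (row : List Int)
    (h : ∀ (x : Nat) (hx : x < row.length), ((x : Int), (y : Int)) = c → row[x] = 0) :
    row.mapIdx (fun x p => if ((x : Int), (y : Int)) ∈ c :: cs ∧ p ≠ 0 then p + 1 else p)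
      = row.mapIdx (fun x p => if ((x : Int), (y : Int)) ∈ cs ∧ p ≠ 0 then p + 1 else p) := by
  apply List.ext_getElem
  · simp
  · intro x hx1 hx2
    have hx1' : x < row.length := by simpa using hx1
    simp only [List.getElem_mapIdx]
    by_cases hce : ((x : Int), (y : Int)) = c
    · have hz := h x hx1' hce
      simp [hz]
    · simp only [List.mem_cons, or_iff_right hce]

-- the row where c hits a nonzero cell: the in-place increment equals A's pointwise update
theorem rowEq_hit (cs : List (Int × Int)) (c : Int × Int) (hc : c ∉ cs) (y x : Nat)
    (row : List Int) (hx : x < row.length) (hcx : c.1 = (x : Int)) (hcy : c.2 = (y : Int))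
    (hv : row[x] ≠ 0) :
    (row.set x (row[x] + 1)).mapIdx (fun x p => if ((x : Int), (y : Int)) ∈ cs ∧ p ≠ 0 then p + 1 else p)
      = row.mapIdx (fun x p => if ((x : Int), (y : Int)) ∈ c :: cs ∧ p ≠ 0 then p + 1 else p) := by
  apply List.ext_getElem
  · simp
  · intro x' hx1 hx2
    simp only [List.getElem_mapIdx] at *
    rw [List.getElem_set]
    by_cases hxx : x = x'
    · subst hxx
      have hce : ((x : Int), (y : Int)) = c := by rw [← hcx, ← hcy]
      have hmemL : ((x : Int), (y : Int)) ∉ cs := fun h => hc (hce ▸ h)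
      have hmemR : ((x : Int), (y : Int)) ∈ c :: cs := by rw [List.mem_cons]; left; exact hce
      rw [if_pos rfl, if_neg (by simp [hmemL]), if_pos ⟨hmemR, hv⟩]
    · have hne : ((x' : Int), (y : Int)) ≠ c := by
        intro he
        exact hxx (by have := congrArg Prod.fst he; simp [hcx] at this; omega)
      rw [if_neg hxx]
      simp only [List.mem_cons, or_iff_right hne]

theorem foldl_cfUpd_eq_cfSpec :
    ∀ (cs : List (Int × Int)) (g : List (List Int)), cs.Nodup →
      cs.foldl cfUpd g = cfSpec cs g := by
  intro cs
  induction cs with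
  | nil =>
    intro g _
    unfold cfSpec
    apply List.ext_getElem
    · simp
    · intro y hy1 hy2
      simp only [List.getElem_mapIdx]
      apply List.ext_getElem
      · simp
      · intro x hx1 hx2; simp
  | cons c cs ih =>
    intro g hnd
    have hc : c ∉ cs := (List.nodup_cons.mp hnd).1
    have hnd' : cs.Nodup := (List.nodup_cons.mp hnd).2
    have key : cfSpec cs (cfUpd g c) = cfSpec (c :: cs) g := by
      unfold cfUpd
      split_ifs with hC
      · obtain ⟨h1, h2, h3, h4, h5⟩ := hC
        have hy : c.2.toNat < g.length := by omega
        have hrow : g.getD c.2.toNat [] = g[c.2.toNat] := List.getD_eq_getElem g [] hy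
        rw [hrow] at h4 h5 ⊢
        have hx : c.1.toNat < g[c.2.toNat].length := by omega
        rw [List.getD_eq_getElem _ 0 hx] at h5 ⊢
        unfold cfSpec
        apply List.ext_getElem?
        intro y
        simp only [List.getElem?_mapIdx, List.getElem?_set]
        by_cases hyy : c.2.toNat = y
        · subst hyy
          rw [if_pos rfl, if_pos hy, List.getElem?_eq_getElem hy]
          simp only [Option.map_some]
          congr 1
          exact rowEq_hit cs c hc c.2.toNat c.1.toNat g[c.2.toNat] hx
            (Int.toNat_of_nonneg h3).symm (Int.toNat_of_nonneg h1).symm h5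
        · rw [if_neg hyy]
          cases hg : g[y]? with
          | none => rfl
          | some row =>
            simp only [Option.map_some]
            congr 1
            exact (rowEq_skip cs c y row (by
              intro x hx' hce
              exact absurd (by have := congrArg Prod.snd hce; simp at this; omega : c.2.toNat = y) hyy)).symm
      · unfold cfSpec
        apply List.ext_getElem?
        intro y
        simp only [List.getElem?_mapIdx]
        cases hg : g[y]? with
        | none => rfl
        | some row =>
          obtain ⟨hy, hrow⟩ := List.getElem?_eq_some_iff.mp hg
          simp only [Option.map_some]
          congr 1
          refine (rowEq_skip cs c y row ?_).symm
          intro x hx hce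
          by_contra hz
          apply hC
          have hcx : c.1 = (x : Int) := (congrArg Prod.fst hce).symm
          have hcy : c.2 = (y : Int) := (congrArg Prod.snd hce).symm
          have hny : c.2.toNat = y := by omega
          have hrowD : g.getD c.2.toNat [] = row := by
            rw [hny, List.getD_eq_getElem g [] hy, hrow]
          refine ⟨by omega, by omega, by omega, ?_, ?_⟩
          · rw [hrowD, hcx]; exact_mod_cast hx
          · rw [hrowD, show c.1.toNat = x by omega, List.getD_eq_getElem _ 0 hx]
            exact hz
    calc (c :: cs).foldl cfUpd g = cs.foldl cfUpd (cfUpd g c) := rfl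
      _ = cfSpec cs (cfUpd g c) := ih _ hnd'
      _ = cfSpec (c :: cs) g := key

-- ===== VERDICT (by name: the statement is the Claim_ definition above) =====
theorem charge_flash_spec : Claim_equal_charge_flash := by
  intro map_lst coords _
  unfold Spec_charge_flash charge_flash_alt
  rw [charge_flash_eq_cfSpec, foldl_cfUpd_eq_cfSpec _ _ (PySem.Set.nodup_ofList coords)]
  unfold cfSpec
  simp [PySem.Set.mem_ofList]
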